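-- pv_equiv track=rewrite | github.com/sathvik-web/ai_project_generator | backend/agent_planner.py | _determine_primary_framework
-- ===== SOURCE A (Python) =====
-- from typing import Dict, List, Any
--
-- def _determine_primary_framework(tech_stack: List[str]) -> str:
--     """Determine primary framework from tech stack."""
--     tech_lower = [t.lower() for t in tech_stack]
--
--     if any(t in tech_lower for t in ["fastapi", "flask", "django"]):
--         if "fastapi" in tech_lower:
--             return "fastapi"
--         elif "flask" in tech_lower:
--             return "flask"
--         elif "django" in tech_lower:
--             return "django"
--
--     if "streamlit" in tech_lower:
--         return "streamlit"
--
--     if "react" in tech_lower: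
--         return "react"
--
--     return "fastapi"  # default
-- ===== SOURCE B (Python) =====
-- _NAMES = ("fastapi", "flask", "django", "streamlit", "react")
-- _RANK = {name: i for i, name in enumerate(_NAMES)}
--
-- def _determine_primary_framework(tech_stack):
--     """Determine primary framework from tech stack (single pass, best-rank accumulator)."""
--     best = len(_NAMES)
--     for t in tech_stack:
--         best = min(best, _RANK.get(t.lower(), len(_NAMES)))
--     return _NAMES[best] if best < len(_NAMES) else "fastapi"
-- ===== Notes on version B (the rewrite author's own statement) =====
-- stated objective: alternative
-- what changed: Replaced A's per-framework membership tests (any()-guard plus nested if/elif cascade, each scanning the stack) with a single pass over the tech stack that folds a best-rank accumulator via a name->rank dict, then indexes the name table by the final rank.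
import Mathlib
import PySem

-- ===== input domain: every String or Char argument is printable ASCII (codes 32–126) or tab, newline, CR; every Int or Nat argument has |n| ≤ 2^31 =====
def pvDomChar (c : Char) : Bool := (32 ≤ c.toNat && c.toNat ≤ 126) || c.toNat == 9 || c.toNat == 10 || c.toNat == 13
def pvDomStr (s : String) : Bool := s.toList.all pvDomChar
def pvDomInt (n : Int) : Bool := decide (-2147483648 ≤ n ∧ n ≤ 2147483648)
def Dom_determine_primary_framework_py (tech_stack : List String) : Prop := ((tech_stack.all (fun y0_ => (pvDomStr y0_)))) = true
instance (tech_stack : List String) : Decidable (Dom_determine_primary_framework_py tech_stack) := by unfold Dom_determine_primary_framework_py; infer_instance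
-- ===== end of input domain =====

-- B replaces A's per-framework membership tests (any()-guard plus if/elif cascade) by a
-- single fold over the tech stack keeping a best-rank accumulator from a name->rank dict
-- (alternative decomposition; same cost).


-- ===== PORT A =====
-- the code after the guarded cascade (both fall-through paths reach it)
def pvTailA (tech_lower : List String) : String :=
  if tech_lower.contains "streamlit" then "streamlit"
  else if tech_lower.contains "react" then "react"
  else "fastapi"

def determine_primary_framework_py (tech_stack : List String) : String :=
  let tech_lower := tech_stack.map PySem.Str.lower
  if ["fastapi", "flask", "django"].any (fun t => tech_lower.contains t) then
    if tech_lower.contains "fastapi" then "fastapi"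
    else if tech_lower.contains "flask" then "flask"
    else if tech_lower.contains "django" then "django"
    else pvTailA tech_lower
  else pvTailA tech_lower

-- ===== PORT B =====
def pvNames : List String := ["fastapi", "flask", "django", "streamlit", "react"]

-- _RANK = {name: i for i, name in enumerate(_NAMES)}
def pvRankDict : PySem.Dict String Int :=
  PySem.Dict.ofList ((PySem.List.enumerate pvNames).map (fun p => (p.2, p.1)))

-- best = min(best, _RANK.get(t.lower(), len(_NAMES)))
def determine_primary_framework_py_alt (tech_stack : List String) : String :=
  let best : Int := tech_stack.foldl
    (fun b t => min b (PySem.Dict.getD pvRankDict (PySem.Str.lower t) (PySem.List.len pvNames)))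
    (PySem.List.len pvNames)
  if best < PySem.List.len pvNames then PySem.List.pyGetD pvNames best "fastapi" else "fastapi"

-- ===== PRECONDITION & SPEC =====
def Spec_determine_primary_framework_py (tech_stack : List String) (out : String) : Prop := out = determine_primary_framework_py_alt tech_stack
instance (tech_stack : List String) (out : String) : Decidable (Spec_determine_primary_framework_py tech_stack out) := by unfold Spec_determine_primary_framework_py; infer_instance

-- ===== CLAIM (what is proved, stated in full; the proofs are below) =====
def Claim_equal_determine_primary_framework_py : Prop := ∀ (tech_stack : List String), Dom_determine_primary_framework_py tech_stack → Spec_determine_primary_framework_py tech_stack (determine_primary_framework_py tech_stack)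

-- ===== LEMMAS AND PROOFS =====

-- rank of one (already lowered) token
def pvRank (t : String) : Int := PySem.Dict.getD pvRankDict t 5

theorem pvRankDict_eq : pvRankDict = PySem.Dict.mk
    [("fastapi", 0), ("flask", 1), ("django", 2), ("streamlit", 3), ("react", 4)] := by
  decide

theorem pvRank_eq (t : String) :
    pvRank t = if t = "fastapi" then 0 else if t = "flask" then 1 else if t = "django" then 2
      else if t = "streamlit" then 3 else if t = "react" then 4 else 5 := by
  unfold pvRank
  rw [pvRankDict_eq]
  by_cases h0 : t = "fastapi"
  · subst h0; decide
  by_cases h1 : t = "flask"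
  · subst h1; decide
  by_cases h2 : t = "django"
  · subst h2; decide
  by_cases h3 : t = "streamlit"
  · subst h3; decide
  by_cases h4 : t = "react"
  · subst h4; decide
  rw [if_neg h0, if_neg h1, if_neg h2, if_neg h3, if_neg h4]
  simp only [PySem.Dict.getD, PySem.Dict.get?_mk_cons, beq_iff_eq]
  rw [if_neg (fun h => h0 h.symm), if_neg (fun h => h1 h.symm), if_neg (fun h => h2 h.symm),
    if_neg (fun h => h3 h.symm), if_neg (fun h => h4 h.symm)]
  simp [PySem.Dict.get?]

theorem pvRank_bounds (t : String) : 0 ≤ pvRank t ∧ pvRank t ≤ 5 := by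
  rw [pvRank_eq]; split_ifs <;> omega

def pvMinRank (l : List String) : Int := l.foldl (fun b t => min b (pvRank t)) 5

theorem pvMinRank_acc (l : List String) (a : Int) (ha : a ≤ 5) :
    l.foldl (fun b t => min b (pvRank t)) a = min a (pvMinRank l) := by
  induction l generalizing a with
  | nil => simp only [List.foldl_nil, pvMinRank]; omega
  | cons t l ih =>
      have hr := pvRank_bounds t
      have h2 : pvMinRank (t :: l) = min (min 5 (pvRank t)) (pvMinRank l) := by
        simp only [pvMinRank, List.foldl_cons]
        exact ih _ (by omega)
      rw [List.foldl_cons, ih _ (by omega), h2]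
      omega

theorem pvMinRank_cons (t : String) (l : List String) :
    pvMinRank (t :: l) = min (pvRank t) (pvMinRank l) := by
  have hr := pvRank_bounds t
  have h2 : pvMinRank (t :: l) = min (min 5 (pvRank t)) (pvMinRank l) := by
    simp only [pvMinRank, List.foldl_cons]
    exact pvMinRank_acc l _ (by omega)
  rw [h2]; omega

theorem pvMinRank_charac (l : List String) :
    pvMinRank l = if l.contains "fastapi" then 0 else if l.contains "flask" then 1
      else if l.contains "django" then 2 else if l.contains "streamlit" then 3
      else if l.contains "react" then 4 else 5 := by
  induction l with
  | nil => simp [pvMinRank]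
  | cons t l ih =>
      rw [pvMinRank_cons, ih, pvRank_eq]
      simp only [List.contains_cons, Bool.or_eq_true, beq_iff_eq]
      by_cases h0 : t = "fastapi" <;> by_cases h1 : t = "flask" <;> by_cases h2 : t = "django" <;>
        by_cases h3 : t = "streamlit" <;> by_cases h4 : t = "react" <;>
        simp [h0, h1, h2, h3, h4] <;> split_ifs <;> first | rfl | omega | simp_all

-- ===== VERDICT (by name: the statement is the Claim_ definition above) =====
theorem determine_primary_framework_py_spec : Claim_equal_determine_primary_framework_py := by
  intro tech_stack _
  unfold Spec_determine_primary_framework_py determine_primary_framework_py determine_primary_framework_py_alt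
  have hb : tech_stack.foldl
      (fun b t => min b (PySem.Dict.getD pvRankDict (PySem.Str.lower t) (PySem.List.len pvNames)))
      (PySem.List.len pvNames) = pvMinRank (tech_stack.map PySem.Str.lower) := by
    simp only [pvMinRank, List.foldl_map]
    rfl
  simp only [hb, pvMinRank_charac, pvTailA, List.any_cons, List.any_nil, Bool.or_eq_true]
  split_ifs <;> first | rfl | tauto
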